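-- pv_equiv track=rewrite | github.com/james-6-23/cursorweb2api | app/utils.py | match_tool_name
-- ===== SOURCE A (Python) =====
-- def normalize_tool_name(name: str) -> str:
--     """将工具名统一标准化：将所有下划线替换为连字符"""
--     return name.replace('_', '-')
--
-- def match_tool_name(tool_name: str, available_tools: list[str]) -> str:
--     """
--     匹配工具名称，如果不在列表中则尝试标准化匹配
--
--     Args:
--         tool_name: 需要匹配的工具名
--         available_tools: 可用的工具名列表
--
--     Returns:
--         匹配到的实际工具名，如果没有匹配返回原名称
--     """
--     # 直接匹配
--     if tool_name in available_tools:
--         return tool_name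
--
--     # 标准化后匹配
--     normalized_input = normalize_tool_name(tool_name)
--     for available_tool in available_tools:
--         if normalize_tool_name(available_tool) == normalized_input:
--             return available_tool
--
--     # 没有匹配，返回原名称
--     return tool_name
-- ===== SOURCE B (Python) =====
-- def normalize_tool_name(name: str) -> str:
--     return name.replace('_', '-')
--
-- def match_tool_name(tool_name: str, available_tools: list[str]) -> str:
--     normalized_input = normalize_tool_name(tool_name)
--     fallback = None
--     for tool in available_tools:
--         if tool == tool_name:
--             return tool_name
--         if fallback is None and normalize_tool_name(tool) == normalized_input:
--             fallback = tool
--     return fallback if fallback is not None else tool_name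
-- ===== Notes on version B (the rewrite author's own statement) =====
-- stated objective: simpler
-- what changed: Replaces A's two scans (membership test, then a separate normalization loop) with a single pass that returns on a direct match and records the first normalized match as a fallback.
import Mathlib
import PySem

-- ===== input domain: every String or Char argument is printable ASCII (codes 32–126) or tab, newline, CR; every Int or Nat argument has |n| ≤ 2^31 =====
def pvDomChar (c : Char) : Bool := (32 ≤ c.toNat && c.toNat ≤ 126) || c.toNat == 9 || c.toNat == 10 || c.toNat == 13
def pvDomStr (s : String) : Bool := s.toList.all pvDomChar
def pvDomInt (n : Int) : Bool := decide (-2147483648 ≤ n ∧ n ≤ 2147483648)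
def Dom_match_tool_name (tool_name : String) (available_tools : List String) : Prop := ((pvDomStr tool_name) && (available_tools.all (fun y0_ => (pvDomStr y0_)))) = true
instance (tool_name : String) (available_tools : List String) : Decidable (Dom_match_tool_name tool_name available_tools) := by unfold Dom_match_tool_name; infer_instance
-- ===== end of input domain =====

-- B merges A's membership test and normalization scan into one pass with a recorded fallback (objective: simpler).


-- ===== PORT A =====
def normalize_tool_name (name : String) : String := PySem.Str.replace name "_" "-"

-- the normalization loop of A ('for available_tool in available_tools: …')
def matchLoopA (tool_name normalized_input : String) : List String → String
  | [] => tool_name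
  | available_tool :: rest =>
      if normalize_tool_name available_tool = normalized_input then available_tool
      else matchLoopA tool_name normalized_input rest

def match_tool_name (tool_name : String) (available_tools : List String) : String :=
  if tool_name ∈ available_tools then tool_name
  else matchLoopA tool_name (normalize_tool_name tool_name) available_tools

-- ===== PORT B =====
-- B's single loop: direct match returns immediately; first normalized match recorded as fallback
def matchLoopB (tool_name normalized_input : String) : List String → Option String → String
  | [], fallback => fallback.getD tool_name
  | tool :: rest, fallback =>
      if tool = tool_name then tool_name
      else matchLoopB tool_name normalized_input rest
        (if fallback.isNone ∧ normalize_tool_name tool = normalized_input then some tool else fallback)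

def match_tool_name_alt (tool_name : String) (available_tools : List String) : String :=
  matchLoopB tool_name (normalize_tool_name tool_name) available_tools none

-- ===== PRECONDITION & SPEC =====
def Spec_match_tool_name (tool_name : String) (available_tools : List String) (out : String) : Prop := out = match_tool_name_alt tool_name available_tools
instance (tool_name : String) (available_tools : List String) (out : String) : Decidable (Spec_match_tool_name tool_name available_tools out) := by unfold Spec_match_tool_name; infer_instance

-- ===== CLAIM (what is proved, stated in full; the proofs are below) =====
def Claim_equal_match_tool_name : Prop := ∀ (tool_name : String) (available_tools : List String), Dom_match_tool_name tool_name available_tools → Spec_match_tool_name tool_name available_tools (match_tool_name tool_name available_tools)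

-- ===== LEMMAS AND PROOFS =====

-- If the direct match is somewhere in the list, B's loop returns tool_name whatever the fallback.
theorem matchLoopB_mem (tn ni : String) (l : List String) (fb : Option String)
    (h : tn ∈ l) : matchLoopB tn ni l fb = tn := by
  induction l generalizing fb with
  | nil => cases h
  | cons t ts ih =>
    simp only [matchLoopB]
    by_cases ht : t = tn
    · simp [ht]
    · have : tn ∈ ts := by
        cases h with
        | head => exact absurd rfl ht
        | tail _ h' => exact h'
      simp [ht, ih _ this]

-- With no direct match present, B's loop returns the fallback if set, else A's normalization loop's value.
theorem matchLoopB_not_mem (tn ni : String) (l : List String) (fb : Option String)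
    (h : tn ∉ l) : matchLoopB tn ni l fb = fb.getD (matchLoopA tn ni l) := by
  induction l generalizing fb with
  | nil => simp [matchLoopB, matchLoopA]
  | cons t ts ih =>
    have ht : ¬ t = tn := fun e => h (e ▸ List.mem_cons_self ..)
    have hts : tn ∉ ts := fun m => h (List.mem_cons_of_mem _ m)
    simp only [matchLoopB, matchLoopA, ht, if_false]
    rw [ih _ hts]
    cases fb with
    | some f => simp
    | none =>
      by_cases hn : normalize_tool_name t = ni <;> simp [hn]

-- ===== VERDICT (by name: the statement is the Claim_ definition above) =====
theorem match_tool_name_spec : Claim_equal_match_tool_name := by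
  intro tn av _
  unfold Spec_match_tool_name match_tool_name match_tool_name_alt
  by_cases h : tn ∈ av
  · simp [h, matchLoopB_mem _ _ _ _ h]
  · simp [h, matchLoopB_not_mem _ _ _ _ h]
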